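-- pv_equiv track=rewrite | github.com/blubber-rubber/AdventOfCode2024 | Day21/part1.py | expand_dir_seq
-- ===== SOURCE A (Python) =====
-- from itertools import product
--
-- def expand_dir_seq(seq, paths):
--     expanded_seq = []
--     products = []
--     for start_pos, end_pos in zip('A' + seq, seq):
--         products.append(paths[(start_pos, end_pos)])
--
--     for point in product(*products):
--         expanded_seq.append('A'.join(point) + 'A')
--     return expanded_seq
-- ===== SOURCE B (Python) =====
-- def expand_dir_seq(seq, paths):
--     # Mixed-radix enumeration: each output corresponds to an integer index whose
--     # digits (most significant first) select one path per transition.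
--     options = [paths[(s, e)] for s, e in zip('A' + seq, seq)]
--     total = 1
--     for opts in options:
--         total *= len(opts)
--     out = []
--     for i in range(total):
--         rem = i
--         parts = []
--         for opts in reversed(options):
--             rem, d = rem // len(opts), rem % len(opts)
--             parts.append(opts[d])
--         parts.reverse()
--         out.append('A'.join(parts) + 'A')
--     return out
-- ===== Notes on version B (the rewrite author's own statement) =====
-- stated objective: alternative
-- what changed: Replaces itertools.product (nested enumeration of all choice tuples) by mixed-radix index arithmetic: B computes total = product of the per-transition option counts and, for each integer i in range(total), decodes i with repeated divmod into one option index per transition (most significant digit first), so the product order falls out of the number system instead of nested iteration.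
import Mathlib
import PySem

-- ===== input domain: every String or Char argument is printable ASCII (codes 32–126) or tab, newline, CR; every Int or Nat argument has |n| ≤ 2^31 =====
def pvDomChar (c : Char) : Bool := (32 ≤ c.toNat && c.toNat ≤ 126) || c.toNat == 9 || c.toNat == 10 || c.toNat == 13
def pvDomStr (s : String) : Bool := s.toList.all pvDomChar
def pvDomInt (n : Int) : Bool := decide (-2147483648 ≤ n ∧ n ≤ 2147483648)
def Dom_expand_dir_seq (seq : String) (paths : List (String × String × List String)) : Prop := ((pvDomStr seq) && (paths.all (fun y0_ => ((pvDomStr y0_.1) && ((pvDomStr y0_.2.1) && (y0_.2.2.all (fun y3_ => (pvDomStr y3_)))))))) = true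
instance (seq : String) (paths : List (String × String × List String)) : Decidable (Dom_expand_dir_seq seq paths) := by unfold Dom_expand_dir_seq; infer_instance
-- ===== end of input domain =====

-- B replaces A's Cartesian-product pipeline (itertools.product over the collected path
-- lists) by mixed-radix index arithmetic: each output number i < prod(lengths) is decoded
-- digit by digit (divmod) into one choice per transition. Objective: alternative algorithm.

-- shared helper: the Python dict paths (keys are the (start,end) pairs) as a PySem.Dict
def pvPathsDict (paths : List (String × String × List String)) : PySem.Dict (String × String) (List String) :=
  PySem.Dict.ofList (paths.map (fun t => ((t.1, t.2.1), t.2.2)))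

-- ===== PORT A =====
-- paths[(s,e)] ; KeyError (missing key) is excluded by Pre_, so the default [] is never hit there
def pvLookup (paths : List (String × String × List String)) (s e : String) : List String :=
  (pvPathsDict paths).getD (s, e) []

-- itertools.product over a list of string lists, in product order (first factor slowest)
def pvProduct : List (List String) → List (List String)
  | [] => [[]]
  | ps :: rest => ps.flatMap (fun x => (pvProduct rest).map (x :: ·))

def expand_dir_seq (seq : String) (paths : List (String × String × List String)) : List String :=
  -- for start_pos, end_pos in zip('A' + seq, seq): products.append(paths[(start_pos, end_pos)])
  let pairs := List.zip ("A" ++ seq).toList seq.toList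
  let products := pairs.foldl (fun acc pr => acc ++ [pvLookup paths (String.singleton pr.1) (String.singleton pr.2)]) []
  -- for point in product(*products): expanded_seq.append('A'.join(point) + 'A')
  (pvProduct products).foldl (fun acc point => acc ++ [PySem.Str.join "A" point ++ "A"]) []

-- ===== PORT B =====
-- the inner decoding loop of Source B: rem = i; for opts in reversed(options): rem, d = rem//len, rem%len;
-- parts.append(opts[d]); parts.reverse().  (opts[d] via pyGet?; the default "" is never hit: d < len(opts)
-- whenever the loop runs, since i < total forces every length positive.)
def pvDecodeParts (options : List (List String)) (i : Int) : List String :=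
  (options.reverse.foldl
      (fun (st : Int × List String) opts =>
        (PySem.Int.floordiv st.1 (opts.length : Int),
         st.2 ++ [(PySem.List.pyGet? opts (PySem.Int.mod st.1 (opts.length : Int))).getD ""]))
      (i, [])).2.reverse

def expand_dir_seq_alt (seq : String) (paths : List (String × String × List String)) : List String :=
  -- options = [paths[(s, e)] for s, e in zip('A' + seq, seq)]
  let options := (List.zip ("A" ++ seq).toList seq.toList).map
      (fun pr => pvLookup paths (String.singleton pr.1) (String.singleton pr.2))
  -- total = 1; for opts in options: total *= len(opts)
  let total := options.foldl (fun t opts => t * (opts.length : Int)) 1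
  -- for i in range(total): out.append('A'.join(decoded parts) + 'A')
  (PySem.List.pyRange 0 total 1).foldl
      (fun out i => out ++ [PySem.Str.join "A" (pvDecodeParts options i) ++ "A"]) []

-- ===== PRECONDITION & SPEC =====
-- Pre_ excludes exactly the KeyError inputs: some consecutive (start,end) pair of 'A'+seq is not a key of paths.
def Pre_expand_dir_seq (seq : String) (paths : List (String × String × List String)) : Prop :=
  ∀ pr ∈ List.zip ("A" ++ seq).toList seq.toList,
    ∃ t ∈ paths, t.1 = String.singleton pr.1 ∧ t.2.1 = String.singleton pr.2
instance (seq : String) (paths : List (String × String × List String)) : Decidable (Pre_expand_dir_seq seq paths) := by unfold Pre_expand_dir_seq; infer_instance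

def pvWitness_expand_dir_seq : String × (List (String × String × List String)) :=
  ("<A", [("A", "<", ["v<"]), ("<", "A", [">", ">>"])])

def Spec_expand_dir_seq (seq : String) (paths : List (String × String × List String)) (out : List String) : Prop := out = expand_dir_seq_alt seq paths
instance (seq : String) (paths : List (String × String × List String)) (out : List String) : Decidable (Spec_expand_dir_seq seq paths out) := by unfold Spec_expand_dir_seq; infer_instance

-- ===== CLAIM (what is proved, stated in full; the proofs are below) =====
def Claim_equal_expand_dir_seq : Prop := ∀ (seq : String) (paths : List (String × String × List String)), Dom_expand_dir_seq seq paths → Pre_expand_dir_seq seq paths → Spec_expand_dir_seq seq paths (expand_dir_seq seq paths)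

-- ===== LEMMAS AND PROOFS =====

-- product of the factor lengths
def pvProdNat (l : List (List String)) : Nat := (l.map List.length).prod

-- the mixed-radix digits of i, most significant first
def pvDigits : List (List String) → Nat → List String
  | [], _ => []
  | b :: rest, i => b.getD ((i / pvProdNat rest) % b.length) "" :: pvDigits rest i

theorem pvProdNat_cons (b : List String) (rest : List (List String)) :
    pvProdNat (b :: rest) = b.length * pvProdNat rest := by
  simp [pvProdNat]

-- characterization of Source B's inner fold over reversed(options)
theorem pvFold_char (rest : List (List String)) (i : Nat) (s0 : List String) :
    rest.reverse.foldl
        (fun (st : Int × List String) opts =>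
          (PySem.Int.floordiv st.1 (opts.length : Int),
           st.2 ++ [(PySem.List.pyGet? opts (PySem.Int.mod st.1 (opts.length : Int))).getD ""]))
        ((i : Int), s0)
      = (((i / pvProdNat rest : Nat) : Int), s0 ++ (pvDigits rest i).reverse) := by
  induction rest generalizing s0 with
  | nil => simp [pvDigits, pvProdNat]
  | cons b rest ih =>
      rw [List.reverse_cons, List.foldl_append, ih]
      simp only [List.foldl_cons, List.foldl_nil, PySem.Int.floordiv_natCast,
        PySem.Int.mod_natCast, PySem.List.pyGet?_natCast, pvDigits, List.reverse_cons]
      simp only [Prod.mk.injEq]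
      refine ⟨?_, ?_⟩
      · rw [Nat.div_div_eq_div_mul, pvProdNat_cons, Nat.mul_comm]
      · rw [← List.getD_eq_getElem?_getD, List.append_assoc]

theorem pvDecodeParts_natCast (options : List (List String)) (i : Nat) :
    pvDecodeParts options (i : Int) = pvDigits options i := by
  simp [pvDecodeParts, pvFold_char options i []]

-- the digits depend on i only modulo the radix product
theorem pvDigits_add (rest : List (List String)) (m r : Nat) (h : pvProdNat rest ∣ m) :
    pvDigits rest (m + r) = pvDigits rest r := by
  induction rest generalizing m with
  | nil => simp [pvDigits]
  | cons b rest ih =>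
      rcases Nat.eq_zero_or_pos m with rfl | hm
      · simp
      rw [pvProdNat_cons] at h
      have hP : 0 < b.length * pvProdNat rest := by
        rcases Nat.eq_zero_or_pos (b.length * pvProdNat rest) with h0 | h0
        · rw [h0] at h; omega
        · exact h0
      have hb : 0 < b.length := by
        rcases Nat.eq_zero_or_pos b.length with h0 | h0
        · rw [h0, Nat.zero_mul] at hP; omega
        · exact h0
      have hP' : 0 < pvProdNat rest := by
        rcases Nat.eq_zero_or_pos (pvProdNat rest) with h0 | h0
        · rw [h0, Nat.mul_zero] at hP; omega
        · exact h0
      obtain ⟨q, rfl⟩ := h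
      simp only [pvDigits]
      congr 1
      · congr 1
        rw [Nat.mul_comm b.length _, Nat.mul_assoc, Nat.mul_add_div hP', Nat.mul_add_mod]
      · exact ih (b.length * pvProdNat rest * q) ⟨b.length * q, by ring⟩

theorem pvProduct_eq_nil (l : List (List String)) (h : pvProdNat l = 0) :
    pvProduct l = [] := by
  induction l with
  | nil => simp [pvProdNat] at h
  | cons b rest ih =>
      rw [pvProdNat_cons] at h
      rcases Nat.mul_eq_zero.mp h with hb | hr
      · rw [pvProduct, List.length_eq_zero_iff.mp hb]; rfl
      · simp [pvProduct, ih hr]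

theorem pvRange_mul_flatMap (N P : Nat) :
    List.range (N * P) = (List.range N).flatMap (fun q => (List.range P).map (fun r => q * P + r)) := by
  induction N with
  | zero => simp
  | succ N ih =>
      rw [Nat.succ_mul, List.range_add, ih, List.range_succ, List.flatMap_append]
      simp

theorem pvFlatMap_getD_range {β : Type} (ps : List String) (g : String → List β) :
    (List.range ps.length).flatMap (fun q => g (ps.getD q "")) = ps.flatMap g := by
  induction ps with
  | nil => simp
  | cons x ps ih =>
      rw [List.length_cons, List.range_succ_eq_map, List.flatMap_cons, List.flatMap_map]
      simp only [List.getD_cons_zero, List.getD_cons_succ]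
      rw [ih, List.flatMap_cons]

theorem pvRange_digits (options : List (List String)) :
    (List.range (pvProdNat options)).map (fun i => pvDigits options i) = pvProduct options := by
  induction options with
  | nil => simp [pvProdNat, pvDigits, pvProduct, List.range_one]
  | cons ps rest ih =>
      rw [pvProdNat_cons, pvProduct]
      rcases Nat.eq_zero_or_pos (pvProdNat rest) with hP | hP
      · rw [hP, Nat.mul_zero, List.range_zero, List.map_nil,
          pvProduct_eq_nil rest hP]
        simp
      rw [pvRange_mul_flatMap, List.map_flatMap]
      rw [← pvFlatMap_getD_range ps (fun x => (pvProduct rest).map (x :: ·))]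
      apply List.flatMap_congr
      intro q hq
      rw [List.map_map, ← ih, List.map_map]
      apply List.map_congr_left
      intro r hr
      rw [List.mem_range] at hq hr
      simp only [Function.comp_apply, pvDigits]
      congr 1
      · congr 1
        rw [Nat.mul_comm q _, Nat.mul_add_div hP, Nat.div_eq_of_lt hr, Nat.add_zero,
          Nat.mod_eq_of_lt hq]
      · exact pvDigits_add rest (q * pvProdNat rest) r ⟨q, Nat.mul_comm _ _⟩

theorem pvFoldl_mul_natCast (l : List (List String)) (c : Nat) :
    l.foldl (fun t opts => t * (opts.length : Int)) (c : Int) = ((c * pvProdNat l : Nat) : Int) := by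
  induction l generalizing c with
  | nil => simp [pvProdNat]
  | cons b rest ih =>
      rw [List.foldl_cons, ← Int.natCast_mul, ih, pvProdNat_cons]
      congr 1
      ring

theorem expand_dir_seq_eq_alt (seq : String) (paths : List (String × String × List String)) :
    expand_dir_seq seq paths = expand_dir_seq_alt seq paths := by
  unfold expand_dir_seq expand_dir_seq_alt
  dsimp only
  rw [PySem.List.foldl_append_singleton_eq_map, PySem.List.foldl_append_singleton_eq_map,
    List.nil_append, List.nil_append]
  have h1 : ((List.zip ("A" ++ seq).toList seq.toList).map
      (fun pr => pvLookup paths (String.singleton pr.1) (String.singleton pr.2))).foldl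
        (fun t opts => t * (opts.length : Int)) 1
      = ((pvProdNat ((List.zip ("A" ++ seq).toList seq.toList).map
          (fun pr => pvLookup paths (String.singleton pr.1) (String.singleton pr.2))) : Nat) : Int) := by
    have := pvFoldl_mul_natCast ((List.zip ("A" ++ seq).toList seq.toList).map
      (fun pr => pvLookup paths (String.singleton pr.1) (String.singleton pr.2))) 1
    simpa using this
  rw [h1, PySem.List.pyRange_zero_natCast, PySem.List.foldl_append_singleton_eq_map,
    List.nil_append, List.map_map, ← pvRange_digits, List.map_map]
  apply List.map_congr_left
  intro i _
  simp only [Function.comp_apply]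
  rw [pvDecodeParts_natCast]

-- ===== VERDICT (by name: the statement is the Claim_ definition above) =====
theorem expand_dir_seq_spec : Claim_equal_expand_dir_seq := by
  intro seq paths _ _
  unfold Spec_expand_dir_seq
  exact expand_dir_seq_eq_alt seq paths
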